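-- pv_equiv track=rewrite | github.com/Victor-Grinan-Dev/digycampus_exercises | python/exercises/luku7.py | kaikki8
-- ===== SOURCE A (Python) =====
-- def kaikki8(aineisto, haettava):
--     result = []
--     for item in haettava :
--         for index in range(len(aineisto)):
--             if aineisto[index] == item:
--                 result.append(index)
--     result.sort()
--     return result
-- ===== SOURCE B (Python) =====
-- def kaikki8(aineisto, haettava):
--     result = []
--     for i in range(len(aineisto)):
--         result.extend([i] * haettava.count(aineisto[i]))
--     return result
-- ===== Notes on version B (the rewrite author's own statement) =====
-- stated objective: simpler
-- what changed: B makes a single ascending pass over aineisto's indices, emitting each index repeated haettava.count(aineisto[i]) times, so the output is built already sorted and the nested per-query scan and the final sort are gone.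
import Mathlib
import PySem

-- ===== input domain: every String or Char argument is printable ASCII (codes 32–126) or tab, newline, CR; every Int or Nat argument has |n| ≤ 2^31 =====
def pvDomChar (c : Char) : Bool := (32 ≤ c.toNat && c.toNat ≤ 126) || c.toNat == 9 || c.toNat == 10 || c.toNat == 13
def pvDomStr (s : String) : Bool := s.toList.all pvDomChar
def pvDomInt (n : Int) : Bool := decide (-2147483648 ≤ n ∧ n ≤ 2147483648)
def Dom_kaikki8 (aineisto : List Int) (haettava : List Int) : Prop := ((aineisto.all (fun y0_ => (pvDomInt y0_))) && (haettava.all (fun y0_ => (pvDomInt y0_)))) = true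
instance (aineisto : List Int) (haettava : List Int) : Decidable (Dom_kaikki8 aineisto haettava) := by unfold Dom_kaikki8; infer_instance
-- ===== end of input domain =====

-- B builds the result in one ascending index pass (already sorted, no final sort); same return value as A.

-- ===== PORT A =====
def kaikki8 (aineisto : List Int) (haettava : List Int) : List Int :=
  let result :=
    haettava.foldl (fun result item =>
      (PySem.List.pyRange 0 aineisto.length 1).foldl (fun result index =>
        if PySem.List.pyGetD aineisto index 0 == item then result ++ [index] else result)
        result) []
  PySem.List.sorted result (fun x => x) false

-- ===== PORT B =====
def kaikki8_alt (aineisto : List Int) (haettava : List Int) : List Int :=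
  (PySem.List.pyRange 0 aineisto.length 1).foldl (fun result i =>
    result ++ List.replicate (PySem.List.count haettava (PySem.List.pyGetD aineisto i 0)) i) []

-- ===== PRECONDITION & SPEC =====
def Spec_kaikki8 (aineisto : List Int) (haettava : List Int) (out : List Int) : Prop := out = kaikki8_alt aineisto haettava
instance (aineisto : List Int) (haettava : List Int) (out : List Int) : Decidable (Spec_kaikki8 aineisto haettava out) := by unfold Spec_kaikki8; infer_instance

-- ===== CLAIM (what is proved, stated in full; the proofs are below) =====
def Claim_equal_kaikki8 : Prop := ∀ (aineisto : List Int) (haettava : List Int), Dom_kaikki8 aineisto haettava → Spec_kaikki8 aineisto haettava (kaikki8 aineisto haettava)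

-- ===== LEMMAS AND PROOFS =====

-- A's unsorted accumulator and B's output as flatMaps
def pvUns (aineisto : List Int) (haettava : List Int) : List Int :=
  haettava.flatMap (fun item =>
    (PySem.List.pyRange 0 aineisto.length 1).filter (fun j => PySem.List.pyGetD aineisto j 0 == item))

def pvAlt (aineisto : List Int) (haettava : List Int) : List Int :=
  (PySem.List.pyRange 0 aineisto.length 1).flatMap (fun i =>
    List.replicate (haettava.count (PySem.List.pyGetD aineisto i 0)) i)

theorem kaikki8_eq_sorted_uns (a h : List Int) :
    kaikki8 a h = PySem.List.sorted (pvUns a h) (fun x => x) false := by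
  simp only [kaikki8, pvUns, PySem.List.foldl_append_if_eq_filter,
    PySem.List.foldl_append_eq_flatMap, List.nil_append]

theorem kaikki8_alt_eq (a h : List Int) : kaikki8_alt a h = pvAlt a h := by
  simp only [kaikki8_alt, pvAlt, PySem.List.count_eq,
    PySem.List.foldl_append_eq_flatMap, List.nil_append]

theorem sum_map_ite_count {f : Int → Nat} (l : List Int) (hl : l.Nodup) (x : Int) :
    (l.map (fun i => if i == x then f i else 0)).sum = if x ∈ l then f x else 0 := by
  induction l with
  | nil => simp
  | cons a t ih =>
    simp only [List.nodup_cons] at hl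
    rw [List.map_cons, List.sum_cons, ih hl.2]
    by_cases hax : a = x
    · subst hax
      simp [hl.1]
    · simp [hax, Ne.symm hax]

theorem sum_map_ite_one {p : Int → Bool} (l : List Int) :
    (l.map (fun b => if p b then 1 else 0)).sum = l.countP p := by
  induction l with
  | nil => simp
  | cons a t ih => by_cases hp : p a <;> simp [hp, ih, List.countP_cons] <;> omega

theorem count_pvUns (a h : List Int) (x : Int) :
    (pvUns a h).count x =
      if x ∈ PySem.List.pyRange 0 a.length 1 then h.count (PySem.List.pyGetD a x 0) else 0 := by
  have hr : (PySem.List.pyRange 0 (a.length : Int) 1).Nodup := PySem.List.nodup_pyRange_one 0 _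
  simp only [pvUns, List.count_flatMap]
  by_cases hx : x ∈ PySem.List.pyRange 0 (a.length : Int) 1
  · have : ∀ item : Int,
        ((PySem.List.pyRange 0 (a.length : Int) 1).filter
          (fun j => PySem.List.pyGetD a j 0 == item)).count x =
        if PySem.List.pyGetD a x 0 == item then 1 else 0 := by
      intro item
      by_cases hk : PySem.List.pyGetD a x 0 == item
      · rw [if_pos hk, List.count_filter (p := fun j => PySem.List.pyGetD a j 0 == item) hk,
          List.count_eq_one_of_mem hr hx]
      · rw [if_neg hk, List.count_eq_zero]
        intro hmem
        exact hk (List.mem_filter.mp hmem).2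
    simp only [Function.comp_def, this, if_pos hx]
    rw [sum_map_ite_one]
    rw [List.count]
    exact List.countP_congr (fun b _ => by rw [BEq.comm])
  · have : ∀ item : Int,
        ((PySem.List.pyRange 0 (a.length : Int) 1).filter
          (fun j => PySem.List.pyGetD a j 0 == item)).count x = 0 := by
      intro item
      rw [List.count_eq_zero]
      intro hmem
      exact hx (List.mem_filter.mp hmem).1
    simp [Function.comp_def, this, hx]

theorem count_pvAlt (a h : List Int) (x : Int) :
    (pvAlt a h).count x =
      if x ∈ PySem.List.pyRange 0 a.length 1 then h.count (PySem.List.pyGetD a x 0) else 0 := by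
  have hr : (PySem.List.pyRange 0 (a.length : Int) 1).Nodup := PySem.List.nodup_pyRange_one 0 _
  simp only [pvAlt, List.count_flatMap, Function.comp_def, List.count_replicate]
  exact sum_map_ite_count _ hr x

theorem pvAlt_perm_pvUns (a h : List Int) : (pvAlt a h).Perm (pvUns a h) := by
  rw [List.perm_iff_count]
  intro x
  rw [count_pvAlt, count_pvUns]

theorem pvAlt_pairwise (a h : List Int) : (pvAlt a h).Pairwise (· ≤ ·) := by
  rw [pvAlt, List.pairwise_flatMap]
  constructor
  · intro i _
    exact List.pairwise_replicate.mpr (Or.inr le_rfl)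
  · refine (PySem.List.pairwise_lt_pyRange_one 0 (a.length : Int)).imp ?_
    intro i j hij x hx y hy
    rw [List.eq_of_mem_replicate hx, List.eq_of_mem_replicate hy]
    exact le_of_lt hij

-- ===== VERDICT (by name: the statement is the Claim_ definition above) =====
theorem kaikki8_spec : Claim_equal_kaikki8 := by
  intro a h _
  show kaikki8 a h = kaikki8_alt a h
  rw [kaikki8_eq_sorted_uns, kaikki8_alt_eq]
  exact PySem.List.sorted_id_eq_of_perm_of_pairwise _ _ (pvAlt_perm_pvUns a h) (pvAlt_pairwise a h)
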